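-- pv_equiv track=rewrite | github.com/swigder/article-headline-generator | data/process_data.py | cut_length
-- ===== SOURCE A (Python) =====
-- def cut_length(string, words):
--     # ugly but fast
--     if len(string) < words:
--         return string
--     spaces = 0
--     for i, c in enumerate(string):
--         if c.isspace():
--             spaces += 1
--             if spaces == words:
--                 return string[:i]
--     return string
-- ===== SOURCE B (Python) =====
-- def cut_length(string, words):
--     idx = [i for i, c in enumerate(string) if c.isspace()]
--     if 1 <= words <= len(idx):
--         return string[:idx[words - 1]]
--     return string
-- ===== Notes on version B (the rewrite author's own statement) =====
-- stated objective: simpler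
-- what changed: Replaces A's scan with a running space counter and early return by building the full list of whitespace positions with a comprehension and slicing at its (words-1)-th entry, returning the string unchanged when words < 1 or there are fewer whitespaces.
import Mathlib
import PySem

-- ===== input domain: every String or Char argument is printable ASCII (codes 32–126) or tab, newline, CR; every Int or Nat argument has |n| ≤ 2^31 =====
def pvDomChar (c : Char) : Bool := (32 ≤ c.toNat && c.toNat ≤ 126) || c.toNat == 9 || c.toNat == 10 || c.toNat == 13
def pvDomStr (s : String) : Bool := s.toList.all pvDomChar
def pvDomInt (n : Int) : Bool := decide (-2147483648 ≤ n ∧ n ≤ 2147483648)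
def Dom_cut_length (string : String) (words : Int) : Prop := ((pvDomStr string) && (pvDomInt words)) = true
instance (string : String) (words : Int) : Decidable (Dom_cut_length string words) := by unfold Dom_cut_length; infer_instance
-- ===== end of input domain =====

-- B replaces A's count-spaces-with-early-return scan by building the full table of
-- whitespace positions once and selecting the (words-1)-th entry (objective: simpler).


-- ===== PORT A =====
-- the 'for i, c in enumerate(string)' loop with the running 'spaces' counter
def cutLenGo (string : String) (words : Int) : List (Int × Char) → Int → String
  | [], _ => string
  | (i, c) :: rest, spaces =>
    if PySem.Chars.isspace c then
      if spaces + 1 = words then PySem.Str.slice string none (some i)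
      else cutLenGo string words rest (spaces + 1)
    else cutLenGo string words rest spaces

def cut_length (string : String) (words : Int) : String :=
  if (PySem.Str.len string : Int) < words then string
  else cutLenGo string words (PySem.List.enumerate string.toList 0) 0

-- ===== PORT B =====
def cut_length_alt (string : String) (words : Int) : String :=
  let idx := (PySem.List.enumerate string.toList 0).filterMap
      (fun p => if PySem.Chars.isspace p.2 then some p.1 else none)
  if 1 ≤ words ∧ words ≤ (idx.length : Int) then
    PySem.Str.slice string none (some (PySem.List.pyGetD idx (words - 1) 0))
  else string

-- ===== PRECONDITION & SPEC =====
def Spec_cut_length (string : String) (words : Int) (out : String) : Prop := out = cut_length_alt string words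
instance (string : String) (words : Int) (out : String) : Decidable (Spec_cut_length string words out) := by unfold Spec_cut_length; infer_instance

-- ===== CLAIM (what is proved, stated in full; the proofs are below) =====
def Claim_equal_cut_length : Prop := ∀ (string : String) (words : Int), Dom_cut_length string words → Spec_cut_length string words (cut_length string words)

-- ===== LEMMAS AND PROOFS =====

theorem cutLenGo_eq (string : String) (words : Int) (l : List (Int × Char)) (spaces : Int) :
    cutLenGo string words l spaces =
      (let idx := l.filterMap (fun p => if PySem.Chars.isspace p.2 then some p.1 else none)
       if 1 ≤ words - spaces ∧ words - spaces ≤ (idx.length : Int) then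
         PySem.Str.slice string none (some (PySem.List.pyGetD idx (words - spaces - 1) 0))
       else string) := by
  induction l generalizing spaces with
  | nil => simp [cutLenGo]; omega
  | cons p rest ih =>
    obtain ⟨i, c⟩ := p
    by_cases hs : PySem.Chars.isspace c
    · by_cases hw : spaces + 1 = words
      · have h1 : words - spaces = 1 := by omega
        simp [cutLenGo, hs, hw, h1, PySem.List.pyGetD,
          PySem.List.pyGet?, PySem.List.pyIdx?]
      · simp only [cutLenGo, if_pos hs, if_neg hw, ih]
        simp only [List.filterMap_cons, if_pos hs, List.length_cons]
        by_cases hc : 1 ≤ words - (spaces + 1) ∧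
            words - (spaces + 1) ≤ ((rest.filterMap (fun p => if PySem.Chars.isspace p.2 then some p.1 else none)).length : Int)
        · rw [if_pos hc, if_pos (by push_cast; omega)]
          congr 1
          have hk : words - (spaces + 1) - 1 = ((words - (spaces + 1) - 1).toNat : Int) := by omega
          have hk1 : words - spaces - 1 = (((words - (spaces + 1) - 1).toNat + 1 : Nat) : Int) := by omega
          rw [hk, hk1, PySem.List.pyGetD_natCast, PySem.List.pyGetD_natCast]
          rfl
        · rw [if_neg hc, if_neg (by push_cast at hc ⊢; omega)]
    · simp only [cutLenGo, ih, List.filterMap_cons, if_neg hs]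

-- ===== VERDICT (by name: the statement is the Claim_ definition above) =====
theorem cut_length_spec : Claim_equal_cut_length := by
  intro string words _
  unfold Spec_cut_length cut_length cut_length_alt
  rw [cutLenGo_eq]
  have hlen : ((PySem.List.enumerate string.toList 0).filterMap
      (fun p => if PySem.Chars.isspace p.2 then some p.1 else none)).length
      ≤ string.toList.length := by
    calc _ ≤ (PySem.List.enumerate string.toList 0).length := List.length_filterMap_le _ _
    _ = string.toList.length := PySem.List.length_enumerate _ _
  by_cases h : (PySem.Str.len string : Int) < words
  · rw [if_pos h]
    rw [if_neg]
    simp only [PySem.Str.len_eq] at h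
    rintro ⟨h1, h2⟩
    omega
  · rw [if_neg h]
    simp only [sub_zero]
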